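-- pv_equiv track=rewrite | github.com/fespadea/Anime_Season_Checker | group_seasons_aggregator.py | format_missing_ranges
-- ===== SOURCE A (Python) =====
-- REV_SEASONS = {0: 'Winter', 1: 'Spring', 2: 'Summer', 3: 'Fall'}
--
-- def val_to_str(val):
--     """Converts an integer back to 'Winter 2001'."""
--     year = val // 4
--     season = REV_SEASONS[val % 4]
--     return f"{season} {year}"
--
-- def format_missing_ranges(missing_vals):
--     """Takes a set of missing season integers and formats them into continuous ranges descending."""
--     if not missing_vals:
--         return []
--
--     missing_vals = list(missing_vals)
--
--     # Temporarily remove BEGINNING_OF_TIME (0) to process standard ranges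
--     has_bot = 0 in missing_vals
--     if has_bot:
--         missing_vals.remove(0)
--
--     if not missing_vals:
--         return ["BEGINNING_OF_TIME"] if has_bot else []
--
--     # Sort descending (newest to oldest)
--     missing_vals = sorted(missing_vals, reverse=True)
--     ranges = []
--
--     start_range = missing_vals[0]
--     prev_val = missing_vals[0]
--
--     for val in missing_vals[1:]:
--         if val == prev_val - 1:
--             # Sequence continues
--             prev_val = val
--         else:
--             # Sequence broken
--             if start_range == prev_val:
--                 ranges.append(val_to_str(start_range))
--             else:
--                 ranges.append(f"{val_to_str(prev_val)} - {val_to_str(start_range)}")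
--             start_range = val
--             prev_val = val
--
--     # Handle the final block and append BEGINNING_OF_TIME logic
--     if has_bot:
--         # If the contiguous block reaches all the way down to 1, it connects to 0 (BOT)
--         if prev_val == 1:
--             ranges.append(f"BEGINNING_OF_TIME - {val_to_str(start_range)}")
--         else:
--             if start_range == prev_val:
--                 ranges.append(val_to_str(start_range))
--             else:
--                 ranges.append(f"{val_to_str(prev_val)} - {val_to_str(start_range)}")
--             ranges.append("BEGINNING_OF_TIME")
--     else:
--         if start_range == prev_val:
--             ranges.append(val_to_str(start_range))
--         else:
--             ranges.append(f"{val_to_str(prev_val)} - {val_to_str(start_range)}")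
--
--     return ranges
-- ===== SOURCE B (Python) =====
-- REV_SEASONS = {0: 'Winter', 1: 'Spring', 2: 'Summer', 3: 'Fall'}
--
-- def val_to_str(val):
--     """Converts an integer back to 'Winter 2001'."""
--     year = val // 4
--     season = REV_SEASONS[val % 4]
--     return f"{season} {year}"
--
-- def format_missing_ranges(missing_vals):
--     """Two-phase: build (high, low) runs first, then format them in one uniform pass."""
--     has_bot = 0 in missing_vals
--     vals = sorted((v for v in missing_vals if v != 0), reverse=True)
--     runs = []  # maximal descending contiguous runs as [high, low]
--     for v in vals:
--         if runs and runs[-1][1] == v + 1: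
--             runs[-1][1] = v
--         else:
--             runs.append([v, v])
--     if has_bot:
--         if runs and runs[-1][1] == 1:
--             runs[-1][1] = 0  # the lowest run reaches down to BEGINNING_OF_TIME
--         else:
--             runs.append([0, 0])
--     def label(hi, lo):
--         if hi == lo:
--             return "BEGINNING_OF_TIME" if hi == 0 else val_to_str(hi)
--         low_s = "BEGINNING_OF_TIME" if lo == 0 else val_to_str(lo)
--         return f"{low_s} - {val_to_str(hi)}"
--     return [label(hi, lo) for hi, lo in runs]
-- ===== Notes on version B (the rewrite author's own statement) =====
-- stated objective: simpler
-- what changed: B is two-phase: it filters out all zeros, builds the list of (high, low) runs as data first, then merges the BEGINNING_OF_TIME marker into that run data and formats every run with one uniform labelling pass, instead of A's single fused scan with start/prev sentinels and a four-way final branch.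
import Mathlib
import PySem

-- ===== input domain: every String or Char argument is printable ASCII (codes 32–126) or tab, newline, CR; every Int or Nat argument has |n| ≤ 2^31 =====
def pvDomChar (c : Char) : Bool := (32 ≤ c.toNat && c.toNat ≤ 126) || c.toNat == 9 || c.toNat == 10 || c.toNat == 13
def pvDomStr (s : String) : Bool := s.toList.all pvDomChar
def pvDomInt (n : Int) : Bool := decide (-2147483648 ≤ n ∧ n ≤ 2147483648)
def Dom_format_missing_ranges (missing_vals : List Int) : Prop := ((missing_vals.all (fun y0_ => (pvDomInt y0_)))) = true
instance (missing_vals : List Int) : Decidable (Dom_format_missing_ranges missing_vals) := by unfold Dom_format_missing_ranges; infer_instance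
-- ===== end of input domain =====

-- B changes the decomposition only: runs are built as (high, low) data first, then labelled in one
-- uniform pass (all zeros filtered, BEGINNING_OF_TIME merged into the run data), instead of A's
-- fused scan with start/prev sentinels and a four-way final branch. Same cost; no speed claimed.

-- ===== PORT A =====
def REV_SEASONS : PySem.Dict Int String :=
  PySem.Dict.ofList [(0, "Winter"), (1, "Spring"), (2, "Summer"), (3, "Fall")]

def val_to_str (val : Int) : String :=
  let year := PySem.Int.floordiv val 4
  -- the key `val % 4` is always one of 0,1,2,3, so the Python dict lookup never raises
  let season := (PySem.Dict.get? REV_SEASONS (PySem.Int.mod val 4)).getD ""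
  season ++ " " ++ PySem.Int.toStr year

-- the range-formatting expression A's Python repeats three times
def fmtA (start_range prev_val : Int) : String :=
  if start_range = prev_val then val_to_str start_range
  else val_to_str prev_val ++ " - " ++ val_to_str start_range

-- the body of A's for-loop, state = (ranges, start_range, prev_val)
def aStep (st : List String × Int × Int) (val : Int) : List String × Int × Int :=
  if val = st.2.2 - 1 then (st.1, st.2.1, val)
  else (st.1 ++ [fmtA st.2.1 st.2.2], val, val)

def format_missing_ranges (missing_vals : List Int) : List String :=
  if missing_vals = [] then []
  else
    let has_bot := missing_vals.contains 0
    -- `missing_vals.remove(0)`: guarded by has_bot, so remove? is always `some` here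
    let mv := if has_bot then (PySem.List.remove? missing_vals 0).getD [] else missing_vals
    if mv = [] then (if has_bot then ["BEGINNING_OF_TIME"] else [])
    else
      match PySem.List.sorted mv (fun x => x) true with
      | [] => []  -- unreachable: mv ≠ []
      | h :: t =>
        let st := t.foldl aStep ([], h, h)
        if has_bot then
          if st.2.2 = 1 then st.1 ++ ["BEGINNING_OF_TIME - " ++ val_to_str st.2.1]
          else st.1 ++ [fmtA st.2.1 st.2.2, "BEGINNING_OF_TIME"]
        else st.1 ++ [fmtA st.2.1 st.2.2]

-- ===== PORT B =====
-- one step of B's run-building loop (runs[-1][1] == v + 1 extends the last run)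
def bStep (runs : List (Int × Int)) (v : Int) : List (Int × Int) :=
  match runs.getLast? with
  | some (hi, lo) => if lo = v + 1 then runs.dropLast ++ [(hi, v)] else runs ++ [(v, v)]
  | none => [(v, v)]

def bLabel (p : Int × Int) : String :=
  if p.1 = p.2 then (if p.1 = 0 then "BEGINNING_OF_TIME" else val_to_str p.1)
  else (if p.2 = 0 then "BEGINNING_OF_TIME" else val_to_str p.2) ++ " - " ++ val_to_str p.1

def format_missing_ranges_alt (missing_vals : List Int) : List String :=
  let has_bot := missing_vals.contains 0
  let vals := PySem.List.sorted (missing_vals.filter (fun v => v ≠ 0)) (fun x => x) true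
  let runs := vals.foldl bStep []
  let runs :=
    if has_bot then
      match runs.getLast? with
      | some (hi, lo) => if lo = 1 then runs.dropLast ++ [(hi, (0 : Int))] else runs ++ [((0 : Int), (0 : Int))]
      | none => [((0 : Int), (0 : Int))]
    else runs
  runs.map bLabel

-- ===== PRECONDITION & SPEC =====
-- Pre_ excludes only Lean lists that contain 0 more than once: the Python argument is a SET of
-- season integers, so such a list represents no actual input (a repeated 0 would make A remove a
-- single occurrence while B ignores all zeros).
def Pre_format_missing_ranges (missing_vals : List Int) : Prop := missing_vals.count 0 ≤ 1
instance (missing_vals : List Int) : Decidable (Pre_format_missing_ranges missing_vals) := by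
  unfold Pre_format_missing_ranges; infer_instance

def pvWitness_format_missing_ranges : List Int := [9, 8, 5, 0, -3]

def Spec_format_missing_ranges (missing_vals : List Int) (out : List String) : Prop := out = format_missing_ranges_alt missing_vals
instance (missing_vals : List Int) (out : List String) : Decidable (Spec_format_missing_ranges missing_vals out) := by unfold Spec_format_missing_ranges; infer_instance

-- ===== CLAIM (what is proved, stated in full; the proofs are below) =====
def Claim_equal_format_missing_ranges : Prop := ∀ (missing_vals : List Int), Dom_format_missing_ranges missing_vals → Pre_format_missing_ranges missing_vals → Spec_format_missing_ranges missing_vals (format_missing_ranges missing_vals)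

-- ===== LEMMAS AND PROOFS =====

-- removing the unique 0 (or none) is the same list as filtering all zeros out
lemma remove_zero_eq_filter (l : List Int) (h : l.count 0 ≤ 1) :
    (if l.contains 0 then l.erase 0 else l) = l.filter (fun v => v ≠ 0) := by
  induction l with
  | nil => simp
  | cons x t ih =>
    by_cases hx : x = 0
    · subst hx
      have h0 : t.count 0 = 0 := by
        rw [List.count_cons_self] at h; omega
      have hnot : (0 : Int) ∉ t := by rwa [← List.count_eq_zero]
      simp only [List.contains_cons, beq_self_eq_true, Bool.true_or, if_pos,
        List.erase_cons_head, List.filter_cons]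
      rw [if_neg (by simp)]
      refine (List.filter_eq_self.mpr fun a ha => ?_).symm
      have hne : a ≠ 0 := fun e => hnot (e ▸ ha)
      simpa using hne
    · have h' : t.count 0 ≤ 1 := by
        rw [List.count_cons_of_ne (by omega)] at h; exact h
      have step : (if (x :: t).contains 0 = true then (x :: t).erase 0 else x :: t)
          = x :: (if t.contains 0 = true then t.erase 0 else t) := by
        have hx0 : ¬ (0 : Int) = x := fun e => hx e.symm
        by_cases hc : (0 : Int) ∈ t
        · simp [hc, hx0, List.erase_cons_tail, hx]
        · simp [hc, hx0]
      rw [step, ih h', List.filter_cons, if_pos (by simpa using hx)]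

-- a run with nonzero endpoints is labelled by B exactly as A formats it
lemma bLabel_eq_fmtA (s p : Int) (_hs : s ≠ 0) (hp : p ≠ 0) : bLabel (s, p) = fmtA s p := by
  by_cases h : s = p <;> simp [bLabel, fmtA, h, hp]

-- the two loops walk the same tail in lock step
lemma scan_eq (t : List Int) (R : List (Int × Int)) (s p : Int)
    (ht : ∀ v ∈ t, v ≠ 0) (hR : ∀ q ∈ R, q.1 ≠ 0 ∧ q.2 ≠ 0) (hs : s ≠ 0) (hp : p ≠ 0) :
    ∃ R' s' p', t.foldl bStep (R ++ [(s, p)]) = R' ++ [(s', p')]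
      ∧ t.foldl aStep (R.map (fun q => fmtA q.1 q.2), s, p) = (R'.map (fun q => fmtA q.1 q.2), s', p')
      ∧ (∀ q ∈ R', q.1 ≠ 0 ∧ q.2 ≠ 0) ∧ s' ≠ 0 ∧ p' ≠ 0 := by
  induction t generalizing R s p with
  | nil => exact ⟨R, s, p, rfl, rfl, hR, hs, hp⟩
  | cons v t ih =>
    have hv : v ≠ 0 := ht v (by simp)
    have ht' : ∀ u ∈ t, u ≠ 0 := fun u hu => ht u (by simp [hu])
    by_cases hc : v = p - 1
    · have hb : bStep (R ++ [(s, p)]) v = R ++ [(s, v)] := by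
        simp [bStep, hc]
      have ha : aStep (R.map (fun q => fmtA q.1 q.2), s, p) v = (R.map (fun q => fmtA q.1 q.2), s, v) := by
        simp [aStep, hc]
      rw [List.foldl_cons, List.foldl_cons, hb, ha]
      exact ih R s v ht' hR hs hv
    · have hb : bStep (R ++ [(s, p)]) v = (R ++ [(s, p)]) ++ [(v, v)] := by
        simp only [bStep, List.getLast?_concat, List.dropLast_concat]
        rw [if_neg (by omega)]
      have ha : aStep (R.map (fun q => fmtA q.1 q.2), s, p) v
          = ((R ++ [(s, p)]).map (fun q => fmtA q.1 q.2), v, v) := by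
        simp [aStep, hc]
      rw [List.foldl_cons, List.foldl_cons, hb, ha]
      refine ih (R ++ [(s, p)]) v v ht' ?_ hv hv
      intro q hq
      rcases List.mem_append.mp hq with h | h
      · exact hR q h
      · simp at h; subst h; exact ⟨hs, hp⟩

-- ===== VERDICT (by name: the statement is the Claim_ definition above) =====
theorem format_missing_ranges_spec : Claim_equal_format_missing_ranges := by
  intro mv _ hpre
  unfold Spec_format_missing_ranges
  by_cases hnil : mv = []
  · subst hnil; rfl
  have hmv : (if mv.contains 0 then (PySem.List.remove? mv 0).getD [] else mv)
      = mv.filter (fun v => v ≠ 0) := by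
    by_cases hc : mv.contains 0
    · have hm : (0 : Int) ∈ mv := by simpa using hc
      rw [if_pos hc, PySem.List.remove?_eq_some_erase mv 0 hm, Option.getD_some]
      have := remove_zero_eq_filter mv hpre
      rwa [if_pos hc] at this
    · have := remove_zero_eq_filter mv hpre
      rw [if_neg hc] at this
      rw [if_neg hc]
      exact this
  unfold format_missing_ranges format_missing_ranges_alt
  rw [if_neg hnil]
  simp only [hmv]
  by_cases hFnil : mv.filter (fun v => v ≠ 0) = []
  · rw [if_pos hFnil, hFnil]
    by_cases hb : (0 : Int) ∈ mv <;>
      simp [hb, bLabel, show PySem.List.sorted ([] : List Int) (fun x => x) true = [] from rfl]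
  · rw [if_neg hFnil]
    rcases hSs : PySem.List.sorted (mv.filter (fun v => v ≠ 0)) (fun x => x) true with _ | ⟨h, t⟩
    · exact absurd ((PySem.List.sorted_eq_nil_iff _ _ _).mp hSs) hFnil
    have hall : ∀ v ∈ h :: t, v ≠ 0 := by
      intro v hv
      have : v ∈ mv.filter (fun u => u ≠ 0) := by
        rw [← PySem.List.mem_sorted _ (fun x => x) true, hSs]
        exact hv
      simpa using (List.mem_filter.mp this).2
    obtain ⟨R', s', p', hBfold, hAfold, hR', hs', hp'⟩ :=
      scan_eq t [] h h (fun v hv => hall v (by simp [hv])) (by simp)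
        (hall h (by simp)) (hall h (by simp))
    have hBfold' : (h :: t).foldl bStep [] = R' ++ [(s', p')] := by
      rw [List.foldl_cons]
      show t.foldl bStep ([] ++ [(h, h)]) = _
      exact hBfold
    have hAfold' : t.foldl aStep ([], h, h) = (R'.map (fun q => fmtA q.1 q.2), s', p') := hAfold
    rw [hSs]
    simp only [hBfold', hAfold']
    have hmapR : R'.map bLabel = R'.map (fun q => fmtA q.1 q.2) :=
      List.map_congr_left fun q hq => by
        rcases q with ⟨a, b⟩
        exact bLabel_eq_fmtA a b (hR' _ hq).1 (hR' _ hq).2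
    by_cases hb : mv.contains 0
    · simp only [hb, if_true, List.getLast?_concat]
      by_cases hp1 : p' = 1
      · subst hp1
        have hbl : bLabel (s', 0) = "BEGINNING_OF_TIME - " ++ val_to_str s' := by
          simp only [bLabel]
          rw [if_neg hs', if_pos True.intro]
          rfl
        simp [hmapR, hbl]
      · have h1 : bLabel (s', p') = fmtA s' p' := bLabel_eq_fmtA s' p' hs' hp'
        have h2 : bLabel (0, 0) = "BEGINNING_OF_TIME" := rfl
        simp [hp1, hmapR, h1, h2]
    · have hm0 : (0 : Int) ∉ mv := by simpa using hb
      have h1 : bLabel (s', p') = fmtA s' p' := bLabel_eq_fmtA s' p' hs' hp'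
      simp [hm0, hmapR, h1]
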